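-- pv_equiv track=rewrite | github.com/sirirajnicu/jaundice-assistant-backend | src/jd_utils/__init__.py | split_risks
-- ===== SOURCE A (Python) =====
-- from typing import TypeVar
--
-- T = TypeVar("T")
--
-- def split_risks(risks: list[T]) -> list[list[T]]:
--     n: int = len(risks)
--     if n % 3 == 0:
--         section_len: int = n // 3
--         return [risks[i * section_len:(i + 1) * section_len] for i in range(3)]
--
--     truncate_pos: int = n // 3 * 3
--     risks_head: list[T] = risks[:truncate_pos]
--     split_truncated_risks: list[list[T]] = split_risks(risks_head)
--
--     for i, extra in enumerate(risks[truncate_pos:]):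
--         split_truncated_risks[i].append(extra)
--
--     return split_truncated_risks
-- ===== SOURCE B (Python) =====
-- def split_risks(risks):
--     n = len(risks)
--     base, rem = divmod(n, 3)
--     out = []
--     for i in range(3):
--         sec = risks[i * base:(i + 1) * base]
--         if i < rem:
--             sec.append(risks[3 * base + i])
--         out.append(sec)
--     return out
-- ===== Notes on version B (the rewrite author's own statement) =====
-- stated objective: simpler
-- what changed: Replaced A's one-level recursion (truncate to a multiple of 3, self-call, then mutate sections by appending tail extras) with a single flat loop that builds each of the three sections directly as a slice plus its optional tail extra.
import Mathlib
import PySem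

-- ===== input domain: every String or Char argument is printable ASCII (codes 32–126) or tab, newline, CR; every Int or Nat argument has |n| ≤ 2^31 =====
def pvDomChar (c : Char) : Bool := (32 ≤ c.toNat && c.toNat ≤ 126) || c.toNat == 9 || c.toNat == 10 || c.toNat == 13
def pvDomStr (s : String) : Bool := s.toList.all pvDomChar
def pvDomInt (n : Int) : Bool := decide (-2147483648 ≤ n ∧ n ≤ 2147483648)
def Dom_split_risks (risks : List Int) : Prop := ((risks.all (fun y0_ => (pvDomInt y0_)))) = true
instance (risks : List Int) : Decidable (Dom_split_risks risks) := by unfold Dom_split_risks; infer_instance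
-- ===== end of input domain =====

-- B replaces A's one-level recursion by one flat loop building each section as slice + optional tail extra (objective: simpler).

-- ===== PORT A =====
-- Python slices risks[a:b] with 0 ≤ a ≤ b use take/drop (exact there); the in-place
-- section.append in the for-loop becomes a foldl with List.set; enumerate → zipIdx.
def split_risks (risks : List Int) : List (List Int) :=
  let n := risks.length
  if n % 3 = 0 then
    (List.range 3).map (fun i => (risks.take ((i + 1) * (n / 3))).drop (i * (n / 3)))
  else
    let truncate_pos := n / 3 * 3
    let risks_head := risks.take truncate_pos
    let split_truncated := split_risks risks_head
    (risks.drop truncate_pos).zipIdx.foldl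
      (fun acc p => acc.set p.2 ((acc.getD p.2 []) ++ [p.1])) split_truncated
termination_by risks.length
decreasing_by
  simp only [List.length_take]
  omega

-- ===== PORT B =====
-- risks[3*base+i] is provably in range when i < rem, ported with getD (default never used).
def split_risks_alt (risks : List Int) : List (List Int) :=
  let n := risks.length
  let base := n / 3
  let rem := n % 3
  (List.range 3).map (fun i =>
    let sec := (risks.take ((i + 1) * base)).drop (i * base)
    if i < rem then sec ++ [risks.getD (3 * base + i) 0] else sec)

-- ===== PRECONDITION & SPEC =====
def Spec_split_risks (risks : List Int) (out : List (List Int)) : Prop := out = split_risks_alt risks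
instance (risks : List Int) (out : List (List Int)) : Decidable (Spec_split_risks risks out) := by unfold Spec_split_risks; infer_instance

-- ===== CLAIM (what is proved, stated in full; the proofs are below) =====
def Claim_equal_split_risks : Prop := ∀ (risks : List Int), Dom_split_risks risks → Spec_split_risks risks (split_risks risks)

-- ===== LEMMAS AND PROOFS =====

theorem split_main (risks : List Int) : split_risks risks = split_risks_alt risks := by
  rw [split_risks]
  unfold split_risks_alt
  set n := risks.length with hn
  by_cases h0 : n % 3 = 0
  · simp only [h0]
    simp [List.range_succ]
  · simp only [if_neg h0]
    have h3 : 0 < 3 := by omega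
    have htp : n / 3 * 3 ≤ n := Nat.div_mul_le_self n 3
    have hlen : (risks.take (n / 3 * 3)).length = n / 3 * 3 := by
      simp [hn]; omega
    have hmod : (n / 3 * 3) % 3 = 0 := Nat.mul_mod_left _ _
    have hdiv : (n / 3 * 3) / 3 = n / 3 := Nat.mul_div_cancel _ h3
    have hs : split_risks (risks.take (n / 3 * 3)) =
        (List.range 3).map (fun i =>
          ((risks.take (n / 3 * 3)).take ((i + 1) * (n / 3))).drop (i * (n / 3))) := by
      rw [split_risks]
      simp [hlen, hmod, hdiv]
    have hsec : ∀ i, i < 3 →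
        ((risks.take (n / 3 * 3)).take ((i + 1) * (n / 3))).drop (i * (n / 3)) =
        (risks.take ((i + 1) * (n / 3))).drop (i * (n / 3)) := by
      intro i hi
      have hle : (i + 1) * (n / 3) ≤ n / 3 * 3 := by
        rw [Nat.mul_comm (n / 3) 3]; exact Nat.mul_le_mul (by omega) le_rfl
      rw [List.take_take, Nat.min_eq_left hle]
    rw [hs]
    simp only [List.range_succ, List.range_zero, List.map_cons, List.map_nil,
      List.nil_append, List.cons_append, hsec 0 (by omega), hsec 1 (by omega), hsec 2 (by omega)]
    have helen : (risks.drop (n / 3 * 3)).length = n % 3 := by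
      simp [hn]; omega
    have hget : ∀ j, (risks.drop (n / 3 * 3))[j]? = risks[n / 3 * 3 + j]? := by
      intro j; rw [List.getElem?_drop]
    have hr : n % 3 = 1 ∨ n % 3 = 2 := by omega
    rcases hr with hr | hr
    · rw [hr] at helen
      obtain ⟨x, he⟩ := List.length_eq_one_iff.mp helen
      rw [he] at hget
      have hx0 : risks[3 * (n / 3)]?.getD 0 = x := by
        rw [Nat.mul_comm 3 (n / 3)]
        have h := (hget 0).symm
        rw [Nat.add_zero] at h
        rw [h]; rfl
      rw [he]
      simp only [hr, List.zipIdx]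
      simp
      exact hx0.symm
    · rw [hr] at helen
      match hh : risks.drop (n / 3 * 3), helen with
      | [x, y], _ =>
        rw [hh] at hget
        have hx0 : risks[3 * (n / 3)]?.getD 0 = x := by
          rw [Nat.mul_comm 3 (n / 3)]
          have h := (hget 0).symm
          rw [Nat.add_zero] at h
          rw [h]; rfl
        have hx1 : risks[3 * (n / 3) + 1]?.getD 0 = y := by
          rw [Nat.mul_comm 3 (n / 3)]
          have h := (hget 1).symm
          rw [h]; rfl
        simp only [hr, List.zipIdx]
        simp
        exact ⟨hx0.symm, hx1.symm⟩

-- ===== VERDICT (by name: the statement is the Claim_ definition above) =====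
theorem split_risks_spec : Claim_equal_split_risks := by
  intro risks _
  exact split_main risks
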